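-- pv_equiv track=rewrite | github.com/yoshkur/puroguramanowo_kitaeru_sugaku_pazuru | q47_2.py | search
-- ===== SOURCE A (Python) =====
-- N = 4
--
-- def search(rows: list):
--     if len(rows) == N:
--         return 1
--
--     count = 0
--     for row in range(2 ** N):
--         cross = [r for r in rows if (row & ~r) > 0 and (~row & r) > 0]
--         if not len(cross):
--             count += search(rows=rows + [row])
--     return count
-- ===== SOURCE B (Python) =====
-- N = 4
--
-- def search(rows: list):
--     k = N - len(rows)
--     count = 0
--     for code in range(16 ** k):
--         # decode `code` into k base-16 digits (least significant first) and
--         # check each digit against everything appended before it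
--         full = list(rows)
--         c = code
--         ok = True
--         for _ in range(k):
--             c, d = divmod(c, 16)
--             for a in full:
--                 if (d & ~a) > 0 and (~d & a) > 0:
--                     ok = False
--             full.append(d)
--         if ok:
--             count += 1
--     return count
-- ===== Notes on version B (the rewrite author's own statement) =====
-- stated objective: alternative
-- what changed: Replaces A's pruned recursive backtracking over the subset lattice by a single flat loop that enumerates all 16**(N-len(rows)) completion codes, decodes each into base-16 digits and checks every digit against everything appended before it.
-- outside the precondition, e.g. on search([0, 1, 2, 3, 4]): A raises RecursionError, B raises TypeError
import Mathlib
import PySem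

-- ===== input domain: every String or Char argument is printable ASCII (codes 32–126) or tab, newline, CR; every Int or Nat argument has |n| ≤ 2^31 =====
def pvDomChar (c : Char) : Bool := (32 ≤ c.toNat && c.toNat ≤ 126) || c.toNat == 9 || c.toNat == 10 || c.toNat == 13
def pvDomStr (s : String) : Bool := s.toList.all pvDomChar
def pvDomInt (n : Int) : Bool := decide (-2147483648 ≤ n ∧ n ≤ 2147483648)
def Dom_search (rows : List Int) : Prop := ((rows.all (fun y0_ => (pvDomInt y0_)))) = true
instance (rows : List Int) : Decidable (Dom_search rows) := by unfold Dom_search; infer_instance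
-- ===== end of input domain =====

-- B replaces A's pruned recursive backtracking by a flat enumeration of all 16^(4-len rows)
-- completion codes, decoding each to base-16 digits and testing each digit against everything
-- appended before it (objective: alternative decomposition, not faster).

-- ===== PORT A =====
-- A recurses appending one row per call until len(rows) == 4; the fuel 4 - len(rows) is exactly
-- the recursion depth whenever len(rows) ≤ 4 (the fuel-0 branch is unreachable under Pre_search).
def searchAux (fuel : Nat) (rows : List Int) : Int :=
  if rows.length == 4 then 1
  else
    match fuel with
    | 0 => 0
    | fuel' + 1 =>
      (PySem.List.pyRange 0 16 1).foldl (fun count row =>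
        let cross := rows.filter (fun r =>
          decide (PySem.Int.band row (Int.not r) > 0 ∧ PySem.Int.band (Int.not row) r > 0))
        if cross.length == 0 then count + searchAux fuel' (rows ++ [row]) else count) 0

def search (rows : List Int) : Int := searchAux (4 - rows.length) rows

-- ===== PORT B =====
-- transliteration of Source B; k = N - len(rows) is Nat subtraction (within Pre_search k = N - len(rows) ≥ 0;
-- outside Pre_search the Python raises: 16 ** k is a float and range() rejects it)
def search_alt (rows : List Int) : Int :=
  let k := 4 - rows.length
  (PySem.List.pyRange 0 ((16 ^ k : Nat) : Int) 1).foldl (fun count code =>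
    let st := (List.range k).foldl (fun (st : Int × List Int × Bool) _ =>
      let c := st.1
      let full := st.2.1
      let ok := st.2.2
      let c' := PySem.Int.floordiv c 16
      let d := PySem.Int.mod c 16
      let ok' := full.foldl (fun ok a =>
        if decide (PySem.Int.band d (Int.not a) > 0 ∧ PySem.Int.band (Int.not d) a > 0) then false else ok) ok
      (c', full ++ [d], ok')) (code, rows, true)
    if st.2.2 then count + 1 else count) 0

-- ===== PRECONDITION & SPEC =====
-- Pre_search excludes len(rows) > 4 = N, where A hits RecursionError (it can never reach
-- len(rows) == N again) and B raises TypeError (range of the float 16 ** negative).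
def Pre_search (rows : List Int) : Prop := rows.length ≤ 4
instance (rows : List Int) : Decidable (Pre_search rows) := by unfold Pre_search; infer_instance
def pvWitness_search : List Int := [0, 3]
def Spec_search (rows : List Int) (out : Int) : Prop := out = search_alt rows
instance (rows : List Int) (out : Int) : Decidable (Spec_search rows out) := by unfold Spec_search; infer_instance

-- ===== CLAIM (what is proved, stated in full; the proofs are below) =====
def Claim_equal_search : Prop := ∀ (rows : List Int), Dom_search rows → Pre_search rows → Spec_search rows (search rows)

-- ===== LEMMAS AND PROOFS =====

-- shared "crossing"/"comparable to all" predicates of the two programs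
def pvCross (x a : Int) : Bool :=
  decide (PySem.Int.band x (Int.not a) > 0 ∧ PySem.Int.band (Int.not x) a > 0)

def pvGood (rows : List Int) (x : Int) : Bool := rows.all (fun a => !(pvCross x a))

-- the common mathematical value: number of length-k completions, one digit at a time
def pvCnt : Nat → List Int → Int
  | 0, _ => 1
  | k + 1, rows =>
      ((List.range 16).map (fun (d : Nat) =>
        if pvGood rows (d : Int) then pvCnt k (rows ++ [(d : Int)]) else 0)).sum

-- base-16 digits of n, least significant first
def pvDigits : Nat → Nat → List Int
  | 0, _ => []
  | k + 1, n => ((n % 16 : Nat) : Int) :: pvDigits k (n / 16)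

-- every digit comparable with everything before it
def pvChain : List Int → List Int → Bool
  | _, [] => true
  | rows, d :: ds => pvGood rows d && pvChain (rows ++ [d]) ds

-- conditional accumulation as a sum
theorem pv_foldl_cond_add {α : Type} (l : List α) (p : α → Bool) (f : α → Int) (a : Int) :
    l.foldl (fun c x => if p x then c + f x else c) a
      = a + (l.map (fun x => if p x then f x else 0)).sum := by
  induction l generalizing a with
  | nil => simp
  | cons x l ih =>
    simp only [List.foldl_cons, List.map_cons, List.sum_cons]
    rw [ih]
    by_cases h : p x
    · simp [h]; ring
    · simp [h]

-- A-side: searchAux with the right fuel computes pvCnt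
theorem pv_searchAux_eq (k : Nat) : ∀ rows : List Int, rows.length + k = 4 →
    searchAux k rows = pvCnt k rows := by
  induction k with
  | zero =>
    intro rows h
    have h4 : rows.length = 4 := by omega
    simp [searchAux, h4, pvCnt]
  | succ k ih =>
    intro rows h
    have h4 : (rows.length == 4) = false := by simp; omega
    rw [searchAux, h4]
    simp only [Bool.false_eq_true, if_false]
    rw [PySem.List.pyRange_one]
    have h16 : (Int.toNat 16) = 16 := rfl
    simp only [sub_zero, h16, zero_add]
    rw [List.foldl_map]
    rw [pv_foldl_cond_add (List.range 16)
        (fun (n : Nat) => ((rows.filter (fun r =>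
          decide (PySem.Int.band (n : Int) (Int.not r) > 0 ∧ PySem.Int.band (Int.not (n : Int)) r > 0))).length == 0))
        (fun (n : Nat) => searchAux k (rows ++ [(n : Int)])) 0]
    rw [zero_add, pvCnt]
    refine congrArg List.sum (List.map_congr_left ?_)
    intro d hd
    have hgood : ((rows.filter (fun r =>
        decide (PySem.Int.band (d : Int) (Int.not r) > 0 ∧ PySem.Int.band (Int.not (d : Int)) r > 0))).length == 0)
        = pvGood rows (d : Int) := by
      rw [Bool.eq_iff_iff]
      simp only [pvGood, pvCross, List.length_eq_zero_iff, List.filter_eq_nil_iff, beq_iff_eq,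
        List.all_eq_true, decide_eq_true_eq, not_and, not_lt, Bool.not_eq_true',
        decide_eq_false_iff_not, gt_iff_lt]
    rw [hgood]
    by_cases hg : pvGood rows (d : Int) = true
    · rw [if_pos hg, if_pos hg, ih (rows ++ [(d : Int)]) (by simp; omega)]
    · rw [if_neg hg, if_neg hg]

-- element-ignoring foldl is iteration
def pvIter {σ : Type} (step : σ → σ) : Nat → σ → σ
  | 0, s => s
  | k + 1, s => pvIter step k (step s)

theorem pv_foldl_ignore {α σ : Type} (step : σ → σ) (l : List α) (s : σ) :
    l.foldl (fun s _ => step s) s = pvIter step l.length s := by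
  induction l generalizing s with
  | nil => rfl
  | cons x l ih => simpa [pvIter] using ih (step s)

-- the inner ok-loop computes pvGood
theorem pv_okfold (d : Int) (l : List Int) (ok : Bool) :
    l.foldl (fun ok a =>
      if decide (PySem.Int.band d (Int.not a) > 0 ∧ PySem.Int.band (Int.not d) a > 0) then false else ok) ok
      = (ok && pvGood l d) := by
  induction l generalizing ok with
  | nil => simp [pvGood]
  | cons a l ih =>
    rw [List.foldl_cons, ih]
    simp only [pvGood, List.all_cons]
    cases hc : (decide (PySem.Int.band d (Int.not a) > 0 ∧ PySem.Int.band (Int.not d) a > 0)) <;>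
      simp only [pvCross, hc, Bool.not_false, Bool.not_true, Bool.true_and, Bool.false_and,
        Bool.and_false, if_true]
    simp

-- B's decode step
def pvStep (st : Int × List Int × Bool) : Int × List Int × Bool :=
  (PySem.Int.floordiv st.1 16, st.2.1 ++ [PySem.Int.mod st.1 16],
    st.2.2 && pvGood st.2.1 (PySem.Int.mod st.1 16))

theorem pv_iter_char (k : Nat) : ∀ (n : Nat) (full : List Int) (ok : Bool),
    pvIter pvStep k ((n : Int), full, ok)
      = (((n / 16 ^ k : Nat) : Int), full ++ pvDigits k n, ok && pvChain full (pvDigits k n)) := by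
  induction k with
  | zero =>
    intro n full ok
    simp [pvIter, pvDigits, pvChain]
  | succ k ih =>
    intro n full ok
    have h1 : PySem.Int.floordiv (n : Int) 16 = ((n / 16 : Nat) : Int) := by
      exact_mod_cast PySem.Int.floordiv_natCast n 16
    have h2 : PySem.Int.mod (n : Int) 16 = ((n % 16 : Nat) : Int) := by
      exact_mod_cast PySem.Int.mod_natCast n 16
    show pvIter pvStep k (pvStep ((n : Int), full, ok)) = _
    rw [pvStep]
    simp only [h1, h2]
    rw [ih]
    have hpow : n / 16 / 16 ^ k = n / 16 ^ (k + 1) := by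
      rw [Nat.div_div_eq_div_mul, pow_succ, mul_comm]
    rw [hpow]
    simp [pvDigits, pvChain, Bool.and_assoc]

-- splitting a range sum into blocks
theorem pv_sum_split (B : Nat) (g : Nat → Int) (M : Nat) :
    ((List.range (M * B)).map g).sum
      = ((List.range M).map (fun q => ((List.range B).map (fun d => g (q * B + d))).sum)).sum := by
  induction M with
  | zero => simp
  | succ M ih =>
    rw [Nat.succ_mul, List.range_add, List.range_succ]
    simp [ih, List.map_map, Function.comp_def]

-- sum interchange
theorem pv_sum_comm (l1 l2 : List Nat) (F : Nat → Nat → Int) :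
    (l1.map (fun a => (l2.map (F a)).sum)).sum
      = (l2.map (fun b => (l1.map (fun a => F a b)).sum)).sum := by
  induction l1 with
  | nil => simp
  | cons a l1 ih =>
    simp only [List.map_cons, List.sum_cons, ih]
    rw [← PySem.List.sum_map_add_int]

-- the flat enumeration counts pvCnt
theorem pv_count_eq (k : Nat) : ∀ rows : List Int,
    ((List.range (16 ^ k)).map (fun n =>
      if pvChain rows (pvDigits k n) then (1 : Int) else 0)).sum = pvCnt k rows := by
  induction k with
  | zero =>
    intro rows
    simp [pvCnt, pvDigits, pvChain, List.range_one]
  | succ k ih =>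
    intro rows
    rw [pow_succ, pv_sum_split 16 _ (16 ^ k)]
    have step1 : ∀ q ∈ List.range (16 ^ k),
        ((List.range 16).map (fun d =>
          if pvChain rows (pvDigits (k + 1) (q * 16 + d)) then (1 : Int) else 0)).sum
        = ((List.range 16).map (fun (d : Nat) =>
          if pvGood rows (d : Int) && pvChain (rows ++ [(d : Int)]) (pvDigits k q)
          then (1 : Int) else 0)).sum := by
      intro q hq
      refine congrArg List.sum (List.map_congr_left ?_)
      intro d hd
      have hd16 : d < 16 := List.mem_range.mp hd
      have e1 : (q * 16 + d) % 16 = d := by omega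
      have e2 : (q * 16 + d) / 16 = q := by omega
      simp [pvDigits, pvChain, e1, e2]
    rw [List.map_congr_left step1, pv_sum_comm]
    show _ = pvCnt (k + 1) rows
    rw [pvCnt]
    refine congrArg List.sum (List.map_congr_left ?_)
    intro d hd
    cases hg : pvGood rows (d : Int)
    · simp
    · simp only [Bool.true_and, if_true]
      rw [← ih (rows ++ [(d : Int)])]

-- B computes pvCnt
theorem pv_search_alt_eq (rows : List Int) : search_alt rows = pvCnt (4 - rows.length) rows := by
  have hinner : (fun (st : Int × List Int × Bool) (_ : Nat) =>
      (PySem.Int.floordiv st.1 16, st.2.1 ++ [PySem.Int.mod st.1 16],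
        st.2.1.foldl (fun ok a =>
          if decide (PySem.Int.band (PySem.Int.mod st.1 16) (Int.not a) > 0 ∧
              PySem.Int.band (Int.not (PySem.Int.mod st.1 16)) a > 0) then false else ok) st.2.2))
      = (fun (st : Int × List Int × Bool) (_ : Nat) => pvStep st) := by
    funext st _
    obtain ⟨c, full, ok⟩ := st
    simp only [pvStep]
    rw [pv_okfold]
  simp only [search_alt]
  rw [hinner]
  rw [PySem.List.pyRange_one]
  simp only [sub_zero, Int.toNat_natCast, zero_add]
  rw [List.foldl_map]
  have hcond : (fun (count : Int) (n : Nat) =>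
      if ((List.range (4 - rows.length)).foldl (fun (st : Int × List Int × Bool) (_ : Nat) => pvStep st)
          ((n : Int), rows, true)).2.2 = true then count + 1 else count)
      = fun (count : Int) (n : Nat) =>
          if pvChain rows (pvDigits (4 - rows.length) n) then count + 1 else count := by
    funext count n
    rw [pv_foldl_ignore, List.length_range, pv_iter_char]
    simp
  rw [hcond, pv_foldl_cond_add (List.range (16 ^ (4 - rows.length)))
      (fun n => pvChain rows (pvDigits (4 - rows.length) n)) (fun _ => (1 : Int)) 0]
  rw [zero_add]
  exact pv_count_eq (4 - rows.length) rows

-- ===== VERDICT (by name: the statement is the Claim_ definition above) =====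
theorem search_spec : Claim_equal_search := by
  intro rows _ hpre
  unfold Spec_search Pre_search at *
  rw [search, pv_searchAux_eq _ rows (by omega), pv_search_alt_eq]
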